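-- pv_equiv track=rewrite | github.com/ColinFendrick/CodeWarsSolutions | zero-and-one.py | replace_zero
-- ===== SOURCE A (Python) =====
-- def replace_zero(arr):
--     lst = []
--     for i in range(len(arr)):
--         if arr[i] == 0:
--            lst.append(i)
--     if len(lst) == 1:
--         return lst[0]
--     elif len(lst) == 0:
--         return None
--
--     lst.insert(0, -1)
--     lst.append(len(arr))
--
--     dif = 0
--     index = 0
--     for i in range(len(lst)-2, 0, -1):
--         if lst[i+1]-lst[i-1] > dif:
--             dif = lst[i+1] - lst[i-1]
--             index = i
--     return lst[index]
-- ===== SOURCE B (Python) =====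
-- def replace_zero(arr):
--     prev_prev = -1
--     prev = None
--     best_gap = 0
--     best_index = None
--     for j, x in enumerate(arr):
--         if x == 0:
--             if prev is not None:
--                 gap = j - prev_prev
--                 if gap >= best_gap:
--                     best_gap = gap
--                     best_index = prev
--                 prev_prev = prev
--             prev = j
--     if prev is None:
--         return None
--     if len(arr) - prev_prev >= best_gap:
--         best_index = prev
--     return best_index
-- ===== Notes on version B (the rewrite author's own statement) =====
-- stated objective: alternative
-- what changed: A collects all zero indices into a list, wraps it with -1/len(arr) sentinels and runs a second, backward argmax scan over it; B makes one forward pass keeping only the last two zero indices and the running best (gap, index), using >= so ties resolve to the higher index exactly as A's backward strict scan does, in O(1) extra space.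
import Mathlib
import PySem

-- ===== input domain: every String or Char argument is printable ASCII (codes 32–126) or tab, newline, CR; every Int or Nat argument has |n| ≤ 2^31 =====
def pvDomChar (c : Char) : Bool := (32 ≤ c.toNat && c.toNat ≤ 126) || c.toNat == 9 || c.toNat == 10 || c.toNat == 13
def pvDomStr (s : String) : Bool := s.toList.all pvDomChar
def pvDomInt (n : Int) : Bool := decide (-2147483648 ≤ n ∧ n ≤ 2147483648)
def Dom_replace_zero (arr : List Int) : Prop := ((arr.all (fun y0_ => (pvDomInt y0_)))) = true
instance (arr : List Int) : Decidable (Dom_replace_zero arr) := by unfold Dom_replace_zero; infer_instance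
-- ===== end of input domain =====

-- B replaces A's two-pass (collect all zero indices, then a backward argmax scan over the
-- sentinel-wrapped index list) by one forward pass keeping only the last two zero indices
-- and the running best gap; same return value, O(1) extra space (objective: alternative).

-- ===== PORT A =====
def replace_zero (arr : List Int) : Option Int :=
  let lst : List Int :=
    (PySem.List.pyRange 0 (PySem.List.len arr) 1).foldl
      (fun lst i => if PySem.List.pyGetD arr i 0 = 0 then lst ++ [i] else lst) []
  if PySem.List.len lst = 1 then some (PySem.List.pyGetD lst 0 0)
  else if PySem.List.len lst = 0 then none
  else
    let lst2 := PySem.List.insert lst 0 (-1)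
    let lst3 := lst2 ++ [PySem.List.len arr]
    let st :=
      (PySem.List.pyRange (PySem.List.len lst3 - 2) 0 (-1)).foldl
        (fun (s : Int × Int) i =>
          if PySem.List.pyGetD lst3 (i+1) 0 - PySem.List.pyGetD lst3 (i-1) 0 > s.1 then
            (PySem.List.pyGetD lst3 (i+1) 0 - PySem.List.pyGetD lst3 (i-1) 0, i)
          else s) (0, 0)
    some (PySem.List.pyGetD lst3 st.2 0)

-- ===== PORT B =====
def replace_zero_alt (arr : List Int) : Option Int :=
  let st : Int × Option Int × Int × Option Int :=
    (PySem.List.enumerate arr 0).foldl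
      (fun (s : Int × Option Int × Int × Option Int) (jx : Int × Int) =>
        if jx.2 = (0:Int) then
          match s with
          | (pp, some p, bg, bi) =>
            let gap := jx.1 - pp
            if gap ≥ bg then (p, some jx.1, gap, some p) else (p, some jx.1, bg, bi)
          | (pp, none, bg, bi) => (pp, some jx.1, bg, bi)
        else s)
      (-1, none, 0, none)
  match st with
  | (pp, some prev, bg, bi) =>
    if PySem.List.len arr - pp ≥ bg then some prev else bi
  | (_, none, _, _) => none

-- ===== PRECONDITION & SPEC =====
def Spec_replace_zero (arr : List Int) (out : Option Int) : Prop := out = replace_zero_alt arr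
instance (arr : List Int) (out : Option Int) : Decidable (Spec_replace_zero arr out) := by unfold Spec_replace_zero; infer_instance

-- ===== CLAIM (what is proved, stated in full; the proofs are below) =====
def Claim_equal_replace_zero : Prop := ∀ (arr : List Int), Dom_replace_zero arr → Spec_replace_zero arr (replace_zero arr)

-- ===== LEMMAS AND PROOFS =====

-- argmax steps: strict (A's backward scan) and non-strict (B's forward scan)
def gtStep {α : Type} (s t : Int × α) : Int × α := if t.1 > s.1 then t else s
def geStep {α : Type} (s t : Int × α) : Int × α := if t.1 ≥ s.1 then t else s

lemma geRun_fst_le {α : Type} : ∀ (l : List (Int × α)) (s : Int × α), s.1 ≤ (l.foldl geStep s).1 := by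
  intro l
  induction l with
  | nil => intro s; simp
  | cons t l ih =>
    intro s
    simp only [List.foldl_cons, geStep]
    split
    · exact le_trans (by omega) (ih t)
    · exact ih s

lemma gt_after_ge {α : Type} : ∀ (l : List (Int × α)) (s t : Int × α), s.1 < t.1 →
    gtStep (l.foldl geStep s) t = l.foldl geStep t := by
  intro l
  induction l with
  | nil => intro s t h; simp [gtStep, h]
  | cons u l ih =>
    intro s t h
    simp only [List.foldl_cons]
    by_cases hu : u.1 ≥ t.1
    · have h1 : geStep s u = u := by simp [geStep]; omega
      have h2 : geStep t u = u := by simp [geStep, hu]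
      rw [h1, h2]
      have := geRun_fst_le l u
      simp only [gtStep]
      rw [if_neg (by omega)]
    · by_cases hs : u.1 ≥ s.1
      · have h1 : geStep s u = u := by simp [geStep, hs]
        have h2 : geStep t u = t := by simp only [geStep]; rw [if_neg (by omega)]
        rw [h1, h2, ih u t (by omega)]
      · have h1 : geStep s u = s := by simp only [geStep]; rw [if_neg (by omega)]
        have h2 : geStep t u = t := by simp only [geStep]; rw [if_neg (by omega)]
        rw [h1, h2, ih s t h]

-- A's reverse-order strict argmax scan equals B's forward non-strict scan
lemma gt_rev_eq_ge {α : Type} : ∀ (l : List (Int × α)) (s : Int × α), (∀ u ∈ l, s.1 < u.1) →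
    l.reverse.foldl gtStep s = l.foldl geStep s := by
  intro l
  induction l with
  | nil => intro s h; rfl
  | cons t l ih =>
    intro s h
    simp only [List.reverse_cons, List.foldl_append, List.foldl_cons, List.foldl_nil]
    rw [ih s (fun u hu => h u (List.mem_cons_of_mem _ hu))]
    rw [gt_after_ge l s t (h t List.mem_cons_self)]
    have ht : geStep s t = t := by
      simp only [geStep]; rw [if_pos (le_of_lt (h t List.mem_cons_self))]
    rw [ht]

lemma gtRun_mapSnd {α β : Type} (h : α → β) : ∀ (l : List (Int × α)) (s : Int × α),
    (l.map (fun t => (t.1, h t.2))).foldl gtStep (s.1, h s.2)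
      = ((l.foldl gtStep s).1, h (l.foldl gtStep s).2) := by
  intro l
  induction l with
  | nil => intro s; rfl
  | cons t l ih =>
    intro s
    simp only [List.map_cons, List.foldl_cons]
    rw [show (gtStep (s.1, h s.2) (t.1, h t.2)) = ((gtStep s t).1, h (gtStep s t).2) by
      simp only [gtStep]; split <;> simp_all]
    exact ih (gtStep s t)

-- the consecutive-triple (gap, middle) list of a sentinel-wrapped list
def gapsOf : List Int → List (Int × Option Int)
  | pp :: p :: z :: rest => (z - pp, some p) :: gapsOf (p :: z :: rest)
  | _ => []

def pends : Int → Int → List Int → Int × Int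
  | pp, p, [] => (pp, p)
  | _, p, z :: rest => pends p z rest

def triples : Int → Int → List Int → List (Int × Option Int)
  | _, _, [] => []
  | pp, p, z :: rest => (z - pp, some p) :: triples p z rest

lemma gapsOf_wrap : ∀ (zs : List Int) (pp p n : Int),
    gapsOf (pp :: p :: zs ++ [n])
      = triples pp p zs ++ [(n - (pends pp p zs).1, some (pends pp p zs).2)] := by
  intro zs
  induction zs with
  | nil => intro pp p n; simp [gapsOf, triples, pends]
  | cons z rest ih =>
    intro pp p n
    simp only [List.cons_append, gapsOf, triples, pends]
    exact congrArg _ (ih p z n)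

lemma gapsOf_range : ∀ (l : List Int),
    (List.range (l.length - 2)).map
      (fun k => (l.getD (k+2) 0 - l.getD k 0, some (l.getD (k+1) 0))) = gapsOf l := by
  intro l
  induction l using gapsOf.induct with
  | case1 pp p z rest ih =>
    simp only [List.length_cons, gapsOf]
    have hl : rest.length + 1 + 1 + 1 - 2 = rest.length + 1 := by omega
    rw [hl, List.range_succ_eq_map, List.map_cons, List.map_map]
    congr 1
  | case2 l h =>
    rcases l with _ | ⟨a, _ | ⟨b, _ | ⟨c, t⟩⟩⟩
    · simp [gapsOf]
    · simp [gapsOf]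
    · simp [gapsOf]
    · exact absurd rfl (h a b c t)

lemma gapsOf_pos : ∀ (l : List Int), l.Pairwise (· < ·) → ∀ t ∈ gapsOf l, 0 < t.1 := by
  intro l
  induction l using gapsOf.induct with
  | case1 pp p z rest ih =>
    intro hp t ht
    rcases List.pairwise_cons.mp hp with ⟨hpp, hp'⟩
    simp only [gapsOf, List.mem_cons] at ht
    rcases ht with h | h
    · subst h
      have : pp < z := hpp z (by simp)
      simpa using this
    · exact ih hp' t h
  | case2 l h =>
    intro _ t ht
    rcases l with _ | ⟨a, _ | ⟨b, _ | ⟨c, t'⟩⟩⟩ <;> simp_all [gapsOf]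

-- the list of indices of zeros, as A's first loop produces it
def zsOf (arr : List Int) : List Int :=
  ((PySem.List.enumerate arr 0).filter (fun q => decide (q.2 = 0))).map (·.1)

-- B's loop step, specialised to a zero element
def zstep (s : Int × Option Int × Int × Option Int) (i : Int) : Int × Option Int × Int × Option Int :=
  match s with
  | (pp, some p, bg, bi) =>
    if i - pp ≥ bg then (p, some i, i - pp, some p) else (p, some i, bg, bi)
  | (pp, none, bg, bi) => (pp, some i, bg, bi)

lemma zfold : ∀ (zs : List Int) (pp p bg : Int) (bi : Option Int),
    zs.foldl zstep (pp, some p, bg, bi)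
      = ((pends pp p zs).1, some (pends pp p zs).2, (triples pp p zs).foldl geStep (bg, bi)) := by
  intro zs
  induction zs with
  | nil => intro pp p bg bi; simp [pends, triples]
  | cons z rest ih =>
    intro pp p bg bi
    simp only [List.foldl_cons, pends, triples]
    have hz : zstep (pp, some p, bg, bi) z = (p, some z, geStep (bg, bi) (z - pp, some p)) := by
      simp only [zstep, geStep]; split <;> rfl
    rw [hz]
    rcases h : geStep (bg, bi) (z - pp, some p) with ⟨bg', bi'⟩
    rw [ih]

lemma foldl_skip {α β : Type} (f : β → α → β) (p : α → Bool)
    (h : ∀ s x, p x = false → f s x = s) :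
    ∀ (l : List α) (s : β), l.foldl f s = (l.filter p).foldl f s := by
  intro l
  induction l with
  | nil => intro s; rfl
  | cons x l ih =>
    intro s
    by_cases hx : p x = true
    · simp [hx, ih]
    · have := h s x (by simpa using hx)
      simp [Bool.eq_false_iff.mpr hx, this, ih]

lemma zsOf_pairwise (arr : List Int) : (zsOf arr).Pairwise (· < ·) := by
  unfold zsOf
  apply List.Pairwise.map
  · intro a b h; exact h
  · exact (PySem.List.pairwise_lt_enumerate arr 0).filter _

lemma zsOf_mem (arr : List Int) : ∀ z ∈ zsOf arr, 0 ≤ z ∧ z < (arr.length : Int) := by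
  intro z hz
  unfold zsOf at hz
  rcases List.mem_map.mp hz with ⟨q, hq, rfl⟩
  have hq' := List.mem_of_mem_filter hq
  rcases (PySem.List.mem_enumerate_iff arr 0 q).mp hq' with ⟨k, hk, hq2⟩
  subst hq2
  simp
  omega

lemma Aloop_eq_zsOf (arr : List Int) :
    (PySem.List.pyRange 0 (PySem.List.len arr) 1).foldl
      (fun lst i => if PySem.List.pyGetD arr i 0 = 0 then lst ++ [i] else lst) [] = zsOf arr := by
  have h1 := PySem.List.enumerate_eq_map_pyRange (xs := arr) (d := 0)
  have h2 := List.foldl_map (f := fun j : Int => (j, PySem.List.pyGetD arr j 0))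
    (g := fun (lst : List Int) (q : Int × Int) => if q.2 = 0 then lst ++ [q.1] else lst)
    (l := PySem.List.pyRange 0 (PySem.List.len arr) 1) (init := ([] : List Int))
  exact h2.symm.trans (by
    rw [← h1,
      PySem.List.foldl_append_ite (p := fun q : Int × Int => q.2 = 0) (f := fun q : Int × Int => q.1)]
    simp [zsOf])

lemma Bchar (arr : List Int) : replace_zero_alt arr =
    (match zsOf arr with
     | [] => none
     | z0 :: rest =>
       if (arr.length : Int) - (pends (-1) z0 rest).1
           ≥ ((triples (-1) z0 rest).foldl geStep ((0:Int), (none : Option Int))).1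
       then some (pends (-1) z0 rest).2
       else ((triples (-1) z0 rest).foldl geStep ((0:Int), (none : Option Int))).2) := by
  unfold replace_zero_alt
  have hskip := foldl_skip
    (f := fun (s : Int × Option Int × Int × Option Int) (jx : Int × Int) =>
        if jx.2 = (0:Int) then
          match s with
          | (pp, some p, bg, bi) =>
            let gap := jx.1 - pp
            if gap ≥ bg then (p, some jx.1, gap, some p) else (p, some jx.1, bg, bi)
          | (pp, none, bg, bi) => (pp, some jx.1, bg, bi)
        else s)
    (p := fun q : Int × Int => decide (q.2 = 0))
    (by intro s x hx
        simp only [decide_eq_false_iff_not] at hx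
        simp [hx])
    (PySem.List.enumerate arr 0) ((-1 : Int), (none : Option Int), (0:Int), (none : Option Int))
  rw [hskip]
  have hfilt : (PySem.List.enumerate arr 0).filter (fun q : Int × Int => decide (q.2 = 0))
      = (zsOf arr).map (fun i => (i, (0:Int))) := by
    unfold zsOf
    rw [List.map_map]
    symm
    conv_rhs => rw [← List.map_id ((PySem.List.enumerate arr 0).filter (fun q : Int × Int => decide (q.2 = 0)))]
    apply List.map_congr_left
    intro q hq
    have h2 : q.2 = 0 := by
      have := List.of_mem_filter hq
      simpa using this
    obtain ⟨a, bq⟩ := q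
    simp_all
  rw [hfilt, List.foldl_map]
  have hstep : (fun (s : Int × Option Int × Int × Option Int) (i : Int) =>
      (fun (s : Int × Option Int × Int × Option Int) (jx : Int × Int) =>
        if jx.2 = (0:Int) then
          match s with
          | (pp, some p, bg, bi) =>
            let gap := jx.1 - pp
            if gap ≥ bg then (p, some jx.1, gap, some p) else (p, some jx.1, bg, bi)
          | (pp, none, bg, bi) => (pp, some jx.1, bg, bi)
        else s) s (i, (0:Int))) = zstep := by
    funext s i
    rcases s with ⟨pp, _ | p, bg, bi⟩ <;> simp [zstep]
  rw [hstep]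
  rcases hz : zsOf arr with _ | ⟨z0, rest⟩
  · rfl
  · simp only [List.foldl_cons]
    have h0 : zstep ((-1 : Int), (none : Option Int), (0:Int), (none : Option Int)) z0
        = ((-1 : Int), some z0, (0:Int), (none : Option Int)) := rfl
    rw [h0, zfold]
    simp only [PySem.List.len_eq]
    split <;> rfl

-- A's body after the zero-index list has been computed (used only to state the proof)
def Abody (Z : List Int) (n : Int) : Option Int :=
  if PySem.List.len Z = 1 then some (PySem.List.pyGetD Z 0 0)
  else if PySem.List.len Z = 0 then none
  else
    some (PySem.List.pyGetD (PySem.List.insert Z 0 (-1) ++ [n])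
      (((PySem.List.pyRange (PySem.List.len (PySem.List.insert Z 0 (-1) ++ [n]) - 2) 0 (-1)).foldl
        (fun (s : Int × Int) i =>
          if PySem.List.pyGetD (PySem.List.insert Z 0 (-1) ++ [n]) (i+1) 0
              - PySem.List.pyGetD (PySem.List.insert Z 0 (-1) ++ [n]) (i-1) 0 > s.1 then
            (PySem.List.pyGetD (PySem.List.insert Z 0 (-1) ++ [n]) (i+1) 0
              - PySem.List.pyGetD (PySem.List.insert Z 0 (-1) ++ [n]) (i-1) 0, i)
          else s) (0, 0)).2) 0)

lemma Abody_char (Z : List Int) (n : Int) (h2 : 2 ≤ Z.length)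
    (hpw : ((-1) :: Z ++ [n]).Pairwise (· < ·)) :
    Abody Z n = ((gapsOf ((-1) :: Z ++ [n])).foldl geStep ((0:Int), some (-1:Int))).2 := by
  have hk : PySem.List.len ((PySem.List.insert Z 0 (-1)) ++ [n]) - 2 = ((Z.length : Nat) : Int) := by
    rw [PySem.List.insert_zero, PySem.List.len_eq]
    simp only [List.length_append, List.length_cons, List.length_nil]
    omega
  unfold Abody
  rw [if_neg (by simp only [PySem.List.len_eq]; omega), if_neg (by simp only [PySem.List.len_eq]; omega)]
  rw [hk]
  set L : List Int := (PySem.List.insert Z 0 (-1)) ++ [n] with hLdef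
  have hL : L = (-1) :: Z ++ [n] := by rw [hLdef, PySem.List.insert_zero]
  set m : Int := ((Z.length : Nat) : Int) with hm
  rw [PySem.List.pyRange_neg_one_eq_reverse]
  have hz1 : (0:Int) + 1 = 1 := by norm_num
  rw [hz1]
  have hfold' : ((PySem.List.pyRange 1 (m+1) 1).reverse).foldl
      (fun (s : Int × Int) i =>
        if PySem.List.pyGetD L (i+1) 0 - PySem.List.pyGetD L (i-1) 0 > s.1 then
          (PySem.List.pyGetD L (i+1) 0 - PySem.List.pyGetD L (i-1) 0, i)
        else s) (0, 0)
      = (((PySem.List.pyRange 1 (m+1) 1).map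
          (fun i : Int => ((PySem.List.pyGetD L (i+1) 0 - PySem.List.pyGetD L (i-1) 0, i) : Int × Int))).reverse).foldl
          gtStep (0, 0) := by
    rw [← List.map_reverse]
    exact (List.foldl_map
      (f := fun i : Int => ((PySem.List.pyGetD L (i+1) 0 - PySem.List.pyGetD L (i-1) 0, i) : Int × Int))
      (g := @gtStep Int)
      (l := (PySem.List.pyRange 1 (m+1) 1).reverse)
      (init := ((0:Int), (0:Int)))).symm
  rw [hfold']
  have hmap := gtRun_mapSnd (fun i : Int => some (PySem.List.pyGetD L i 0))
    (((PySem.List.pyRange 1 (m+1) 1).map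
        (fun i : Int => ((PySem.List.pyGetD L (i+1) 0 - PySem.List.pyGetD L (i-1) 0, i) : Int × Int))).reverse)
    ((0:Int), (0:Int))
  have hTA : ((PySem.List.pyRange 1 (m+1) 1).map
        (fun i : Int => ((PySem.List.pyGetD L (i+1) 0 - PySem.List.pyGetD L (i-1) 0, i) : Int × Int))).map
        (fun t : Int × Int => (t.1, some (PySem.List.pyGetD L t.2 0)))
      = gapsOf L := by
    rw [List.map_map, ← gapsOf_range L]
    rw [PySem.List.pyRange_one]
    rw [List.map_map]
    have hmm : ((m+1-1).toNat) = L.length - 2 := by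
      rw [hm, hL]
      simp only [List.length_append, List.length_cons, List.length_nil]
      omega
    rw [hmm]
    apply List.map_congr_left
    intro j hj
    have hj2 : j + 2 < L.length := by
      simp only [List.mem_range] at hj; omega
    have e3 : (1:Int) + (j:Int) = ((j+1 : Nat) : Int) := by push_cast; ring
    have e1 : ((j+1 : Nat) : Int) + 1 = ((j+2 : Nat) : Int) := by push_cast; ring
    have e2 : ((j+1 : Nat) : Int) - 1 = ((j : Nat) : Int) := by push_cast; ring
    simp only [Function.comp, e3, e1, e2, PySem.List.pyGetD_natCast]
  rw [List.map_reverse] at hmap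
  rw [hTA] at hmap
  have hinit : ((fun i : Int => some (PySem.List.pyGetD L i 0)) 0) = some (-1 : Int) := by
    rw [hL]
    show some (PySem.List.pyGetD ((-1) :: Z ++ [n]) 0 0) = some (-1 : Int)
    simp [PySem.List.pyGetD_zero]
  simp only [hinit] at hmap
  -- hmap : (gapsOf L).reverse.foldl gtStep (0, some (-1)) = (run.1, some (pyGetD L run.2 0))
  have hpos : ∀ u ∈ gapsOf L, ((0:Int), some (-1:Int)).1 < u.1 := by
    intro u hu
    exact gapsOf_pos L (hL ▸ hpw) u hu
  have hrev := gt_rev_eq_ge (gapsOf L) ((0:Int), some (-1:Int)) hpos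
  rw [hrev] at hmap
  rw [hL] at hmap
  exact congrArg (fun p : Int × Option Int => p.2) hmap.symm

lemma wrap_pairwise (Z : List Int) (n : Int) (hpw : Z.Pairwise (· < ·))
    (hb : ∀ z ∈ Z, 0 ≤ z ∧ z < n) (hn : 0 ≤ n) :
    ((-1) :: Z ++ [n]).Pairwise (· < ·) := by
  refine List.Pairwise.cons ?_ ?_
  · intro x hx
    rcases List.mem_append.mp hx with h | h
    · have := (hb x h).1; omega
    · simp at h; omega
  · change List.Pairwise (· < ·) (Z ++ [n])
    rw [List.pairwise_append]
    refine ⟨hpw, List.pairwise_singleton _ _, ?_⟩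
    intro z hz m hm
    simp at hm
    subst hm
    exact (hb z hz).2

-- ===== VERDICT (by name: the statement is the Claim_ definition above) =====
theorem replace_zero_spec : Claim_equal_replace_zero := by
  intro arr _
  unfold Spec_replace_zero
  have hA0 : replace_zero arr = Abody ((PySem.List.pyRange 0 (PySem.List.len arr) 1).foldl
      (fun lst i => if PySem.List.pyGetD arr i 0 = 0 then lst ++ [i] else lst) [])
      (PySem.List.len arr) := rfl
  rw [hA0, Aloop_eq_zsOf arr, PySem.List.len_eq, Bchar arr]
  rcases hz : zsOf arr with _ | ⟨z0, rest⟩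
  · simp [Abody, PySem.List.len_eq]
  · rcases rest with _ | ⟨z1, rest'⟩
    · -- exactly one zero
      have h0 : (0:Int) ≤ (arr.length : Int) := by positivity
      simp only [Abody, PySem.List.len_eq, List.length_cons, List.length_nil, pends, triples,
        List.foldl_nil]
      rw [if_pos (by norm_num), if_pos (by omega)]
      simp [PySem.List.pyGetD_zero]
    · -- at least two zeros
      have hb := zsOf_mem arr
      rw [hz] at hb
      have hz1pos : (0:Int) ≤ z1 := (hb z1 (by simp)).1
      have hpw2 : ((-1) :: (z0 :: z1 :: rest') ++ [(arr.length : Int)]).Pairwise (· < ·) := by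
        have := wrap_pairwise (zsOf arr) (arr.length : Int) (zsOf_pairwise arr) (zsOf_mem arr)
          (by positivity)
        rw [hz] at this
        exact this
      rw [Abody_char (z0 :: z1 :: rest') (arr.length : Int) (by simp) hpw2]
      rw [gapsOf_wrap (z1 :: rest') (-1) z0 (arr.length : Int), List.foldl_append]
      have hS : (triples (-1) z0 (z1 :: rest')).foldl geStep ((0:Int), some (-1:Int))
          = (triples (-1) z0 (z1 :: rest')).foldl geStep ((0:Int), (none : Option Int)) := by
        simp only [triples, List.foldl_cons]
        congr 1
        simp only [geStep]
        rw [if_pos (by simp; omega), if_pos (by simp; omega)]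
      rw [hS]
      simp only [List.foldl_cons, List.foldl_nil, geStep]
      split <;> rfl
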